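-- pv_equiv track=rewrite | github.com/celpegor216/ps | 프로그래머스/lv0/120884. 치킨 쿠폰/치킨 쿠폰.py | solution
-- ===== SOURCE A (Python) =====
-- def solution(chicken):
--     answer = 0
--     cupon = 0
--
--     for i in range(chicken):
--         cupon += 1
--         if cupon == 10:
--             answer += 1
--             cupon = 1
--
--     if cupon == 10:
--         answer += 1
--
--     return answer
-- ===== SOURCE B (Python) =====
-- def solution(chicken):
--     # Closed form: each bonus chicken returns its coupon, so every 9 real
--     # coupons past the first yield one bonus; total bonuses = (chicken-1)//9.
--     return max(0, (chicken - 1) // 9)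
-- ===== Notes on version B (the rewrite author's own statement) =====
-- stated objective: faster
-- what changed: Replaced the per-chicken simulation loop with the closed-form max(0,(chicken-1)//9).
import Mathlib
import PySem

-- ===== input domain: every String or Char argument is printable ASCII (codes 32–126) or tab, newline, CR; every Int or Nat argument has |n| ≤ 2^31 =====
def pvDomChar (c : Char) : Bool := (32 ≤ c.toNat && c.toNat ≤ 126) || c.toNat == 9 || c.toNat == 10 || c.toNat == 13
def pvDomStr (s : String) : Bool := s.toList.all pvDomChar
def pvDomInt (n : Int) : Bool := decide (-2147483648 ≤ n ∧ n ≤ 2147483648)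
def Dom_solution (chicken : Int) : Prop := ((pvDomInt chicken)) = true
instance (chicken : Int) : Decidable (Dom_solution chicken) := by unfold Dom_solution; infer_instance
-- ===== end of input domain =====

-- B replaces A's per-chicken simulation loop with the closed form max(0,(chicken-1)//9) (faster).

-- ===== PORT A =====
-- loop body of A: cupon += 1; if cupon == 10: answer += 1; cupon = 1
def pvStep (st : Int × Int) : Int × Int :=
  let cupon := st.2 + 1
  if cupon = 10 then (st.1 + 1, 1) else (st.1, cupon)

def solution (chicken : Int) : Int :=
  let s := (PySem.List.pyRange 0 chicken 1).foldl (fun st _ => pvStep st) (0, 0)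
  if s.2 = 10 then s.1 + 1 else s.1

-- ===== PORT B =====
def solution_alt (chicken : Int) : Int :=
  max 0 (PySem.Int.floordiv (chicken - 1) 9)

-- ===== PRECONDITION & SPEC =====
def Spec_solution (chicken : Int) (out : Int) : Prop := out = solution_alt chicken
instance (chicken : Int) (out : Int) : Decidable (Spec_solution chicken out) := by unfold Spec_solution; infer_instance

-- ===== CLAIM (what is proved, stated in full; the proofs are below) =====
def Claim_equal_solution : Prop := ∀ (chicken : Int), Dom_solution chicken → Spec_solution chicken (solution chicken)

-- ===== LEMMAS AND PROOFS =====
theorem pv_foldl_const (l : List Int) (init : Int × Int) :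
    l.foldl (fun st _ => pvStep st) init = pvStep^[l.length] init := by
  induction l generalizing init with
  | nil => rfl
  | cons x xs ih => simp [List.foldl, Function.iterate_succ_apply, ih]

theorem pv_iter (n : Nat) :
    pvStep^[n + 1] (0, 0) = (((n / 9 : Nat) : Int), ((n % 9 : Nat) : Int) + 1) := by
  induction n with
  | zero => decide
  | succ m ih =>
    rw [Function.iterate_succ_apply', ih]
    by_cases h : m % 9 = 8
    · simp only [pvStep, h]
      simp only [Prod.ext_iff]
      norm_num
      omega
    · simp only [pvStep]
      have h10 : ¬ ((((m % 9 : Nat) : Int) + 1) + 1 = 10) := by omega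
      simp only [h10, if_false, Prod.ext_iff]
      constructor <;> omega

theorem solution_spec : Claim_equal_solution := by
  intro chicken _
  simp only [Spec_solution, solution, solution_alt]
  rcases (by omega : chicken ≤ 0 ∨ 0 < chicken) with hle | hpos
  · rw [PySem.List.pyRange_one_eq_nil (by omega)]
    simp only [List.foldl]
    have : PySem.Int.floordiv (chicken - 1) 9 < 0 := by
      rw [PySem.Int.floordiv_lt_iff_lt_mul (by norm_num : (0:Int) < 9)]; omega
    simp; omega
  · obtain ⟨m, hm⟩ : ∃ m : Nat, chicken = (m : Int) + 1 := ⟨(chicken - 1).toNat, by omega⟩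
    rw [pv_foldl_const]
    have hlen : (PySem.List.pyRange 0 chicken 1).length = m + 1 := by
      rw [PySem.List.length_pyRange_one]; omega
    rw [hlen, pv_iter]
    have h2 : ¬ (((m % 9 : Nat) : Int) + 1 = 10) := by omega
    simp only [h2, if_false]
    have : PySem.Int.floordiv (chicken - 1) 9 = ((m / 9 : Nat) : Int) := by
      rw [PySem.Int.floordiv_eq_iff_of_pos (by norm_num : (0:Int) < 9)]; omega
    rw [this]; omega
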